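-- pv_equiv track=rewrite | github.com/IByatharthVardan/Demo | solution/modules/scripts Yatharth latest.udf/table.py | manipulate_vehicle_schedule_table
-- ===== SOURCE A (Python) =====
-- def manipulate_vehicle_schedule_table( table ):
--
--   new_table = [["Effective From" , "Effective To", "Vehicle Registration", "Cover - Vehicle", "Cover - Vehicle - Mapped"]]
--
--   for i in range(len(table[1:])):
--     new_table.append(["","","","",""])
--
--   if len(table[0]) == 2:
--     # this is the case where the build is returning None for Unique_Cover_Mapping_Basis
--     vrn_column = 1
--     for index, row in enumerate(table[1:]):
--       new_table[index+1][2] = table[index+1][vrn_column]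
--
--     cv_column = 0
--     for index, row in enumerate(table[1:]):
--       new_table[index+1][3] = table[index+1][cv_column]
--
--
--     return new_table
--
--
--   for i in range(3):
--     for j,row in enumerate(table[1:]):
--       new_table[j+1][i+2] = table[j+1][i]
--
--
--   return new_table
-- ===== SOURCE B (Python) =====
-- def manipulate_vehicle_schedule_table(table):
--     header = ["Effective From", "Effective To", "Vehicle Registration",
--               "Cover - Vehicle", "Cover - Vehicle - Mapped"]
--     if len(table[0]) == 2:
--         return [header] + [["", "", row[1], row[0], ""] for row in table[1:]]
--     return [header] + [["", "", row[0], row[1], row[2]] for row in table[1:]]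
-- ===== Notes on version B (the rewrite author's own statement) =====
-- stated objective: simpler
-- what changed: B makes one row-major pass over table[1:] building each shaped output row directly, instead of A's pre-allocating blank rows and then filling individual cells in separate column-major passes with index arithmetic.
import Mathlib
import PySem

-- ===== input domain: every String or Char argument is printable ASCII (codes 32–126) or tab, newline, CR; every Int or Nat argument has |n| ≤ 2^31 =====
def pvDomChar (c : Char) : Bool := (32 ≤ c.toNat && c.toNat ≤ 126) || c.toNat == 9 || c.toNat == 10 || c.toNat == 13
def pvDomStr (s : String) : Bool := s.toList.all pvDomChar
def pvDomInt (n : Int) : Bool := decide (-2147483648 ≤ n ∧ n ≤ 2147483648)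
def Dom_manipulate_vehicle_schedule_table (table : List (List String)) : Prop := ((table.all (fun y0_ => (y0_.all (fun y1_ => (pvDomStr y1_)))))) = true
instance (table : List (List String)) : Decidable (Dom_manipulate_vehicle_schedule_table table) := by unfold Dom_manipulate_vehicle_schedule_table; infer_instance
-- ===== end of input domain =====

-- Header comment: B builds each shaped output row in one row-major pass over table[1:],
-- instead of A's blank-row pre-allocation followed by cell-by-cell column-major mutation passes.

-- ===== PORT A =====
-- table[i][j] read (in-range under Pre_)
def pvTGet (t : List (List String)) (i j : Nat) : String := (t.getD i []).getD j ""
-- new_table[i][j] = v  (in-range under Pre_)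
def pvTSet (t : List (List String)) (i j : Nat) (v : String) : List (List String) :=
  t.set i ((t.getD i []).set j v)

def manipulate_vehicle_schedule_table (table : List (List String)) : List (List String) :=
  let n := (table.drop 1).length
  let new_table : List (List String) :=
    ["Effective From", "Effective To", "Vehicle Registration", "Cover - Vehicle", "Cover - Vehicle - Mapped"]
      :: (List.range n).map (fun _ => ["", "", "", "", ""])
  if (table.headD []).length = 2 then
    -- vrn_column = 1
    let nt1 := (List.range n).foldl (fun nt index => pvTSet nt (index + 1) 2 (pvTGet table (index + 1) 1)) new_table
    -- cv_column = 0
    let nt2 := (List.range n).foldl (fun nt index => pvTSet nt (index + 1) 3 (pvTGet table (index + 1) 0)) nt1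
    nt2
  else
    (List.range 3).foldl (fun nt i =>
      (List.range n).foldl (fun nt j => pvTSet nt (j + 1) (i + 2) (pvTGet table (j + 1) i)) nt) new_table

-- ===== PORT B =====
def manipulate_vehicle_schedule_table_alt (table : List (List String)) : List (List String) :=
  let header : List String :=
    ["Effective From", "Effective To", "Vehicle Registration", "Cover - Vehicle", "Cover - Vehicle - Mapped"]
  if (table.headD []).length = 2 then
    header :: (table.drop 1).map (fun row => ["", "", row.getD 1 "", row.getD 0 "", ""])
  else
    header :: (table.drop 1).map (fun row => ["", "", row.getD 0 "", row.getD 1 "", row.getD 2 ""])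

-- ===== PRECONDITION & SPEC =====
-- Pre_ excludes exactly the inputs where the Python raises IndexError: the empty table
-- (table[0]) and data rows shorter than the columns read (2 columns in the len==2 branch,
-- 3 columns otherwise).
def Pre_manipulate_vehicle_schedule_table (table : List (List String)) : Prop :=
  table ≠ [] ∧
    (if (table.headD []).length = 2
      then ∀ r ∈ table.drop 1, 2 ≤ r.length
      else ∀ r ∈ table.drop 1, 3 ≤ r.length)
instance (table : List (List String)) : Decidable (Pre_manipulate_vehicle_schedule_table table) := by
  unfold Pre_manipulate_vehicle_schedule_table; infer_instance

def pvWitness_manipulate_vehicle_schedule_table : List (List String) :=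
  [["a", "b"], ["REG1", "COV1"]]

def Spec_manipulate_vehicle_schedule_table (table : List (List String)) (out : List (List String)) : Prop := out = manipulate_vehicle_schedule_table_alt table
instance (table : List (List String)) (out : List (List String)) : Decidable (Spec_manipulate_vehicle_schedule_table table out) := by unfold Spec_manipulate_vehicle_schedule_table; infer_instance

-- ===== CLAIM (what is proved, stated in full; the proofs are below) =====
def Claim_equal_manipulate_vehicle_schedule_table : Prop := ∀ (table : List (List String)), Dom_manipulate_vehicle_schedule_table table → Pre_manipulate_vehicle_schedule_table table → Spec_manipulate_vehicle_schedule_table table (manipulate_vehicle_schedule_table table)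

-- ===== LEMMAS AND PROOFS =====

-- getD of a mapped range, in range
theorem pv_getD_map_range {α : Type} (f : Nat → α) (d : α) {n k : Nat} (hk : k < n) :
    (((List.range n).map f).getD k d) = f k := by
  simp [List.getD, hk]

-- set at the exact seam of an append
theorem pv_set_mid {α : Type} (L1 : List α) (r : α) (rest : List α) (v : α) :
    (L1 ++ r :: rest).set L1.length v = L1 ++ v :: rest := by
  induction L1 with
  | nil => rfl
  | cons a t ih => simp [ih]

-- one column-filling pass: folding pvTSet at positions 1..n over (header :: rows)
theorem pv_foldl_tset (c : Nat) (w : Nat → String) :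
    ∀ (n : Nat) (h0 : List String) (rows : List (List String)), n ≤ rows.length →
    ((List.range n).foldl (fun nt idx => pvTSet nt (idx + 1) c (w idx)) (h0 :: rows))
      = h0 :: ((List.range n).map (fun k => (rows.getD k []).set c (w k)) ++ rows.drop n) := by
  intro n
  induction n with
  | zero => intro h0 rows _; simp
  | succ m ih =>
    intro h0 rows hle
    have hm : m ≤ rows.length := Nat.le_of_succ_le hle
    have hmlt : m < rows.length := hle
    rw [List.range_succ, List.foldl_append, ih h0 rows hm]
    have hlen : ((List.range m).map (fun k => (rows.getD k []).set c (w k))).length = m := by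
      simp
    have hdrop : rows.drop m = (rows.getD m []) :: rows.drop (m + 1) := by
      rw [List.drop_eq_getElem_cons hmlt, List.getD_eq_getElem rows [] hmlt]
    simp only [List.foldl_cons, List.foldl_nil]
    unfold pvTSet
    rw [hdrop]
    have hget : ((h0 :: ((List.range m).map (fun k => (rows.getD k []).set c (w k)) ++
        (rows.getD m []) :: rows.drop (m + 1))).getD (m + 1) [])
        = rows.getD m [] := by
      simp [List.getD]
    rw [hget]
    have hmid := pv_set_mid ((List.range m).map (fun k => (rows.getD k []).set c (w k)))
        (rows.getD m []) (rows.drop (m + 1)) ((rows.getD m []).set c (w m))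
    rw [hlen] at hmid
    rw [List.set_cons_succ, hmid]
    simp

-- range-indexed map over getD equals a direct map
theorem pv_map_range_getD {α β : Type} (g : α → β) (d : α) :
    ∀ (l : List α), (List.range l.length).map (fun k => g (l.getD k d)) = l.map g := by
  intro l
  induction l with
  | nil => simp
  | cons a t ih =>
    rw [List.length_cons, List.range_succ_eq_map, List.map_cons, List.map_map]
    have hcomp : ((fun k => g ((a :: t).getD k d)) ∘ Nat.succ) = (fun k => g (t.getD k d)) := rfl
    rw [hcomp, ih]
    rfl

-- folding one column-setting pass over a range-indexed table of rows
theorem pv_fold_on_mapped (c : Nat) (w : Nat → String) (g : Nat → List String) (n : Nat) (h0 : List String) :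
    ((List.range n).foldl (fun nt idx => pvTSet nt (idx + 1) c (w idx)) (h0 :: (List.range n).map g))
      = h0 :: (List.range n).map (fun k => (g k).set c (w k)) := by
  rw [pv_foldl_tset c w n h0 _ (by simp)]
  have hd : ((List.range n).map g).drop n = [] := by simp
  rw [hd, List.append_nil]
  congr 1
  exact List.map_congr_left (fun k hk => by rw [pv_getD_map_range g [] (List.mem_range.mp hk)])

-- ===== VERDICT (by name: the statement is the Claim_ definition above) =====
theorem manipulate_vehicle_schedule_table_spec : Claim_equal_manipulate_vehicle_schedule_table := by
  intro table _ _
  unfold Spec_manipulate_vehicle_schedule_table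
  simp only [manipulate_vehicle_schedule_table, manipulate_vehicle_schedule_table_alt]
  have hgetD : ∀ (i j : Nat), pvTGet table (i + 1) j = ((table.drop 1).getD i []).getD j "" := by
    intro i j
    unfold pvTGet
    congr 1
    cases table with
    | nil => simp
    | cons h t => simp [List.getD]
  by_cases hc : (table.headD []).length = 2
  · rw [if_pos hc, if_pos hc]
    rw [pv_fold_on_mapped, pv_fold_on_mapped]
    congr 1
    have hrow : ∀ k : Nat,
        ((((fun (_ : Nat) => (["", "", "", "", ""] : List String)) k).set 2 (pvTGet table (k + 1) 1)).set 3 (pvTGet table (k + 1) 0))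
        = (["", "", ((table.drop 1).getD k []).getD 1 "", ((table.drop 1).getD k []).getD 0 "", ""] : List String) := by
      intro k; rw [hgetD, hgetD]; rfl
    simp only [hrow]
    exact pv_map_range_getD (fun row => (["", "", row.getD 1 "", row.getD 0 "", ""] : List String)) [] (table.drop 1)
  · rw [if_neg hc, if_neg hc]
    rw [show List.range 3 = [0, 1, 2] from rfl]
    simp only [List.foldl_cons, List.foldl_nil]
    rw [pv_fold_on_mapped, pv_fold_on_mapped, pv_fold_on_mapped]
    congr 1
    have hrow : ∀ k : Nat,
        (((((fun (_ : Nat) => (["", "", "", "", ""] : List String)) k).set (0 + 2) (pvTGet table (k + 1) 0)).set (1 + 2) (pvTGet table (k + 1) 1)).set (2 + 2) (pvTGet table (k + 1) 2))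
        = (["", "", ((table.drop 1).getD k []).getD 0 "", ((table.drop 1).getD k []).getD 1 "", ((table.drop 1).getD k []).getD 2 ""] : List String) := by
      intro k; rw [hgetD, hgetD, hgetD]; rfl
    simp only [hrow]
    exact pv_map_range_getD (fun row => (["", "", row.getD 0 "", row.getD 1 "", row.getD 2 ""] : List String)) [] (table.drop 1)
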